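-- pv_equiv track=rewrite | github.com/FieryIceStickie/AdventOfCode | Years/2016/Day20/code.py | part_b_solver
-- ===== SOURCE A (Python) =====
-- def part_b_solver(data: list[tuple[int, int]]):
--     count = 0
--     current = 0
--     for start, end in data:
--         if start > current + 1:
--             count += start - current - 1
--         current = max(end, current)
--     return count + max(4294967295 - current, 0)
-- ===== SOURCE B (Python) =====
-- def part_b_solver(data: list[tuple[int, int]]):
--     def go(rest, current):
--         if not rest:
--             return max(4294967295 - current, 0)
--         (start, end), *tail = rest
--         return max(start - current - 1, 0) + go(tail, max(end, current))
--     return go(data, 0)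
-- ===== Notes on version B (the rewrite author's own statement) =====
-- stated objective: alternative
-- what changed: Replaced the iterative loop with two forward accumulators (count, current) by a structural recursion that threads only the running max end and builds the gap sum on the way back, folding the final tail term into the base case.
import Mathlib
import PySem

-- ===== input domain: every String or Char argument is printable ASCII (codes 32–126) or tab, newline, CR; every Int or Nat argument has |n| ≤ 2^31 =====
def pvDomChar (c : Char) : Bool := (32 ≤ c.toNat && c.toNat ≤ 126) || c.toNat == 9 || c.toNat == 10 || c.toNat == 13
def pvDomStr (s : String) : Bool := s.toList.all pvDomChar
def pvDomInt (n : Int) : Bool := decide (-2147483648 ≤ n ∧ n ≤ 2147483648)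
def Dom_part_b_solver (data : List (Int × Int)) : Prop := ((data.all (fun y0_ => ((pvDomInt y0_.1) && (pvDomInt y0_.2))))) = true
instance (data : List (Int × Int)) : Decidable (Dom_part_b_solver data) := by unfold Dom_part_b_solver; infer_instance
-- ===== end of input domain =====

-- ===== PORT A =====
-- Honest one-line: B recurses on the list, carrying only the running max end and
-- summing gaps on the way back; same O(n) cost, different decomposition.
def part_b_solver (data : List (Int × Int)) : Int :=
  let st := data.foldl (fun (acc : Int × Int) p =>
    let count := acc.1
    let current := acc.2
    let count := if p.1 > current + 1 then count + (p.1 - current - 1) else count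
    (count, max p.2 current)) (0, 0)
  st.1 + max (4294967295 - st.2) 0

-- ===== PORT B =====
def pbGo : List (Int × Int) → Int → Int
  | [], current => max (4294967295 - current) 0
  | (s, e) :: tail, current => max (s - current - 1) 0 + pbGo tail (max e current)

def part_b_solver_alt (data : List (Int × Int)) : Int := pbGo data 0

-- ===== PRECONDITION & SPEC =====
def Spec_part_b_solver (data : List (Int × Int)) (out : Int) : Prop := out = part_b_solver_alt data
instance (data : List (Int × Int)) (out : Int) : Decidable (Spec_part_b_solver data out) := by unfold Spec_part_b_solver; infer_instance

-- ===== CLAIM (what is proved, stated in full; the proofs are below) =====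
def Claim_equal_part_b_solver : Prop := ∀ (data : List (Int × Int)), Dom_part_b_solver data → Spec_part_b_solver data (part_b_solver data)

-- ===== LEMMAS AND PROOFS =====
theorem pb_key (l : List (Int × Int)) : ∀ (count current : Int),
    (l.foldl (fun (acc : Int × Int) p =>
      let count := acc.1
      let current := acc.2
      let count := if p.1 > current + 1 then count + (p.1 - current - 1) else count
      (count, max p.2 current)) (count, current)).1
    + max (4294967295 - (l.foldl (fun (acc : Int × Int) p =>
      let count := acc.1
      let current := acc.2
      let count := if p.1 > current + 1 then count + (p.1 - current - 1) else count
      (count, max p.2 current)) (count, current)).2) 0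
    = count + pbGo l current := by
  induction l with
  | nil => intro count current; simp [pbGo]
  | cons hd tl ih =>
      intro count current
      simp only [List.foldl_cons, pbGo]
      rw [ih]
      have : (if hd.1 > current + 1 then count + (hd.1 - current - 1) else count)
          = count + max (hd.1 - current - 1) 0 := by split_ifs <;> omega
      rw [this]; ring

-- ===== VERDICT (by name: the statement is the Claim_ definition above) =====
theorem part_b_solver_spec : Claim_equal_part_b_solver := by
  intro data _
  show part_b_solver data = part_b_solver_alt data
  unfold part_b_solver part_b_solver_alt
  simpa using pb_key data 0 0
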